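-- pv_equiv track=rewrite | github.com/davidunga/geometric-neurons | common/utils/dictools.py | modify_dict
-- ===== SOURCE A (Python) =====
-- from copy import deepcopy
--
-- def modify_dict(base_dict: dict, copy: bool, exclude: list = None,
--                 include: list = None, update_dict: dict = None):
--
--     keys = base_dict.keys()
--     if include is not None:
--         keys = [k for k in keys if k in include]
--     if exclude is not None:
--         keys = [k for k in keys if k not in exclude]
--     if update_dict:
--         if not isinstance(keys, list):
--             keys = list(keys)
--         keys += [k for k in update_dict.keys() if k not in keys]
--     else:
--         update_dict = {}
--
--     ret = {k: update_dict[k] if k in update_dict else base_dict[k] for k in keys}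
--     if copy:
--         ret = deepcopy(ret)
--     return ret
-- ===== SOURCE B (Python) =====
-- from copy import deepcopy
--
-- def modify_dict(base_dict: dict, copy: bool, exclude: list = None,
--                 include: list = None, update_dict: dict = None):
--     # Build the result in one pass; dict assignment handles the merge/override.
--     ret = {}
--     for k, v in base_dict.items():
--         if include is not None and k not in include:
--             continue
--         if exclude is not None and k in exclude:
--             continue
--         ret[k] = v
--     if update_dict:
--         for k, v in update_dict.items():
--             ret[k] = v
--     return deepcopy(ret) if copy else ret
-- ===== Notes on version B (the rewrite author's own statement) =====
-- stated objective: simpler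
-- what changed: B builds the result dict directly in one pass over base_dict (skipping keys failing the include/exclude guards inline) and then assigns update_dict items, relying on dict overwrite/append semantics instead of A's maintained key-union list with 'k not in keys' dedup and a final two-way-lookup comprehension.
import Mathlib
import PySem

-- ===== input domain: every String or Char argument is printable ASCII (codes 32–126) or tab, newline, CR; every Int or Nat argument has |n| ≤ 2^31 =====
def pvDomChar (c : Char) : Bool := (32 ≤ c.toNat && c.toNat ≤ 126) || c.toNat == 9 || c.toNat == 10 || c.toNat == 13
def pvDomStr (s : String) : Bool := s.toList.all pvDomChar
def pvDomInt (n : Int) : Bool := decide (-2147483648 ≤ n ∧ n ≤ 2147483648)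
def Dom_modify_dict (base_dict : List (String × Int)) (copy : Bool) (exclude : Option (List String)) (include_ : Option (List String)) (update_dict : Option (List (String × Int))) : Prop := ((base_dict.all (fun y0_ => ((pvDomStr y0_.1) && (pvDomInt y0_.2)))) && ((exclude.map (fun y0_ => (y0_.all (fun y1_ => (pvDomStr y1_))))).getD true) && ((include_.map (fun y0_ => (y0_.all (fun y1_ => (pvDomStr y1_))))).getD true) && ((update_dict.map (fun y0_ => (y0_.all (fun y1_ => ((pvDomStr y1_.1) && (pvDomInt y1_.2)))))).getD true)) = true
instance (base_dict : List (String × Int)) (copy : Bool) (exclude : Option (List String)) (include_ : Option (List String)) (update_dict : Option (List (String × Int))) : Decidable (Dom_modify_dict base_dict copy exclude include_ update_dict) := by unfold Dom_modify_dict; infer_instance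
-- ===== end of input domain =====

-- B builds the result dict in one pass using dict overwrite/append semantics instead of A's
-- key-union list with membership dedup; equivalence of the returned value is proved ('copy'
-- deep-copies in Python, which is identity on the returned value).


-- ===== PORT A =====
-- Literal transliteration of A: build the key list (filter by include, then exclude, then
-- append fresh update keys when update_dict is truthy), then the comprehension
-- {k: update_dict[k] if k in update_dict else base_dict[k] for k in keys}.
-- deepcopy under 'copy' is the identity on the returned str→int dict value.
def modify_dict (base_dict : List (String × Int)) (copy : Bool) (exclude : Option (List String)) (include_ : Option (List String)) (update_dict : Option (List (String × Int))) : List (String × Int) :=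
  let base := PySem.Dict.ofList base_dict
  let keys0 := base.keys
  let keys1 := include_.elim keys0 (fun inc => keys0.filter (fun k => inc.contains k))
  let keys2 := exclude.elim keys1 (fun exc => keys1.filter (fun k => !exc.contains k))
  let udict := PySem.Dict.ofList (update_dict.getD [])
  let keys3 := if !(update_dict.getD []).isEmpty then
      keys2 ++ udict.keys.filter (fun k => !keys2.contains k)
    else keys2
  let ret := keys3.foldl (fun d k =>
      d.insert k (if udict.contains k then udict.getD k 0 else base.getD k 0)) PySem.Dict.empty
  let _ := copy
  ret.items

-- ===== PORT B =====
-- Transliteration of B: one pass over base_dict.items() inserting keys that pass the guards,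
-- then (under the same truthiness test) assign each update_dict item into the result.
def modify_dict_alt (base_dict : List (String × Int)) (copy : Bool) (exclude : Option (List String)) (include_ : Option (List String)) (update_dict : Option (List (String × Int))) : List (String × Int) :=
  let ret0 : PySem.Dict String Int := (PySem.Dict.ofList base_dict).items.foldl
      (fun (d : PySem.Dict String Int) (p : String × Int) =>
        if include_.elim false (fun inc => !inc.contains p.1) then d
        else if exclude.elim false (fun exc => exc.contains p.1) then d
        else d.insert p.1 p.2) PySem.Dict.empty
  let ret : PySem.Dict String Int := update_dict.elim ret0 (fun l =>
    if l.isEmpty then ret0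
    else (PySem.Dict.ofList l).items.foldl (fun (d : PySem.Dict String Int) (p : String × Int) => d.insert p.1 p.2) ret0)
  let _ := copy
  ret.items

-- ===== PRECONDITION & SPEC =====
def Spec_modify_dict (base_dict : List (String × Int)) (copy : Bool) (exclude : Option (List String)) (include_ : Option (List String)) (update_dict : Option (List (String × Int))) (out : List (String × Int)) : Prop := out = modify_dict_alt base_dict copy exclude include_ update_dict
instance (base_dict : List (String × Int)) (copy : Bool) (exclude : Option (List String)) (include_ : Option (List String)) (update_dict : Option (List (String × Int))) (out : List (String × Int)) : Decidable (Spec_modify_dict base_dict copy exclude include_ update_dict out) := by unfold Spec_modify_dict; infer_instance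

-- ===== CLAIM (what is proved, stated in full; the proofs are below) =====
def Claim_equal_modify_dict : Prop := ∀ (base_dict : List (String × Int)) (copy : Bool) (exclude : Option (List String)) (include_ : Option (List String)) (update_dict : Option (List (String × Int))), Dom_modify_dict base_dict copy exclude include_ update_dict → Spec_modify_dict base_dict copy exclude include_ update_dict (modify_dict base_dict copy exclude include_ update_dict)

-- ===== LEMMAS AND PROOFS =====

-- mapping a projection over a filter by that projection
lemma pv_map_fst_filter {α β : Type} (f : α → β) (q : β → Bool) :
    ∀ l : List α, (l.filter (fun x => q (f x))).map f = (l.map f).filter q := by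
  intro l
  induction l with
  | nil => rfl
  | cons a l ih => by_cases h : q (f a) <;> simp [h, ih]

-- filters by pointwise-equal predicates agree
lemma pv_filter_ext {α : Type} (p q : α → Bool) (h : ∀ a, p a = q a) (l : List α) :
    l.filter p = l.filter q :=
  List.filter_congr (fun a _ => h a)

-- B's guarded insert loop is the insert loop over the filtered items
lemma pv_foldl_guard (c1 c2 : String → Bool) :
    ∀ (l : List (String × Int)) (d : PySem.Dict String Int),
    l.foldl (fun (d : PySem.Dict String Int) (p : String × Int) =>
        if c1 p.1 then d else if c2 p.1 then d else d.insert p.1 p.2) d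
      = (l.filter (fun p => !(c1 p.1 || c2 p.1))).foldl
          (fun (d : PySem.Dict String Int) (p : String × Int) => d.insert p.1 p.2) d := by
  intro l
  induction l with
  | nil => intro d; rfl
  | cons p l ih =>
    intro d
    by_cases h1 : c1 p.1
    · simp [h1, ih]
    · by_cases h2 : c2 p.1
      · simp [h1, h2, ih]
      · simp [h1, h2, ih]

-- A's two option-guarded filters collapse to one filter by the combined predicate
lemma pv_keys2A (include_ exclude : Option (List String)) (ks : List String) :
    exclude.elim (include_.elim ks (fun inc => ks.filter (fun k => inc.contains k)))
      (fun exc => (include_.elim ks (fun inc => ks.filter (fun k => inc.contains k))).filter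
        (fun k => !exc.contains k))
    = ks.filter (fun k => !(include_.elim false (fun inc => !inc.contains k)
        || exclude.elim false (fun exc => exc.contains k))) := by
  cases include_ with
  | none =>
    cases exclude with
    | none => simp
    | some exc => simp
  | some inc =>
    cases exclude with
    | none =>
      simp only [Option.elim_some, Option.elim_none]
      exact pv_filter_ext _ _ (fun a => by cases hx : inc.contains a <;> simp [hx]) ks
    | some exc =>
      simp only [Option.elim_some]
      rw [List.filter_filter]
      exact pv_filter_ext _ _
        (fun a => by cases hx : inc.contains a <;> cases hy : exc.contains a <;> simp [hx, hy]) ks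

-- lookup after folding an insert loop over a nodup association list
lemma pv_getD_foldl_ins :
    ∀ (L : List (String × Int)), (L.map Prod.fst).Nodup →
    ∀ (d : PySem.Dict String Int) (k : String),
    (L.foldl (fun (d : PySem.Dict String Int) (p : String × Int) => d.insert p.1 p.2) d).getD k 0
      = if (PySem.Dict.mk L).contains k then (PySem.Dict.mk L).getD k 0 else d.getD k 0 := by
  intro L
  induction L with
  | nil => intro _ d k; simp
  | cons p L ih =>
    rcases p with ⟨a, v⟩
    intro hnd d k
    have hmem : a ∉ L.map Prod.fst := (List.nodup_cons.mp (by simpa using hnd)).1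
    have htl : (L.map Prod.fst).Nodup := (List.nodup_cons.mp (by simpa using hnd)).2
    rw [List.foldl_cons, ih htl]
    have hcons_c : (PySem.Dict.mk ((a, v) :: L)).contains k
        = (if a == k then true else (PySem.Dict.mk L).contains k) := by
      rw [PySem.Dict.contains_eq_isSome_get?, PySem.Dict.contains_eq_isSome_get?,
        PySem.Dict.get?_mk_cons]
      by_cases h : (a == k) = true <;> simp [h]
    have hcons_g : (PySem.Dict.mk ((a, v) :: L)).getD k 0
        = (if a == k then v else (PySem.Dict.mk L).getD k 0) := by
      rw [PySem.Dict.getD_eq_get?_getD, PySem.Dict.get?_mk_cons]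
      by_cases h : (a == k) = true <;> simp [h, PySem.Dict.getD_eq_get?_getD]
    by_cases hk : a = k
    · subst hk
      have hcL : (PySem.Dict.mk L).contains a = false := by
        rw [PySem.Dict.contains_eq_isSome_get?]
        have hnone : (PySem.Dict.mk L).get? a = none := by
          rw [PySem.Dict.get?_eq_none_iff_not_mem_keys, PySem.Dict.keys_mk]
          simpa using hmem
        rw [hnone]; rfl
      simp [hcons_c, hcons_g, hcL, PySem.Dict.getD_insert_self]
    · have hbk : (a == k) = false := by simpa using hk
      have hne : k ≠ a := fun h => hk h.symm
      rw [hcons_c, hcons_g, hbk, PySem.Dict.getD_insert_of_ne _ _ _ hne]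
      simp
-- central equivalence: A's key-union/comprehension form equals B's build-then-update form
lemma pv_central (bd ud : PySem.Dict String Int) (hbd : bd.keys.Nodup) (hud : ud.keys.Nodup)
    (emp : Bool) (hemp : emp = true → ud = PySem.Dict.empty) (keep : String → Bool) :
    ((if !emp then bd.keys.filter keep ++ ud.keys.filter (fun k => !(bd.keys.filter keep).contains k)
       else bd.keys.filter keep).foldl
       (fun (d : PySem.Dict String Int) (k : String) =>
         d.insert k (if ud.contains k then ud.getD k 0 else bd.getD k 0)) PySem.Dict.empty).items
    = (if emp
       then ((bd.items.filter (fun p => keep p.1)).foldl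
             (fun (d : PySem.Dict String Int) (p : String × Int) => d.insert p.1 p.2)
             PySem.Dict.empty).items
       else (ud.items.foldl
             (fun (d : PySem.Dict String Int) (p : String × Int) => d.insert p.1 p.2)
             ((bd.items.filter (fun p => keep p.1)).foldl
              (fun (d : PySem.Dict String Int) (p : String × Int) => d.insert p.1 p.2)
              PySem.Dict.empty)).items) := by
  have hkeys_items : bd.keys = bd.items.map Prod.fst := rfl
  set F := bd.items.filter (fun p => keep p.1) with hFdef
  have hFnd : (F.map Prod.fst).Nodup := by
    have hs : (F.map Prod.fst).Sublist (bd.items.map Prod.fst) :=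
      List.Sublist.map Prod.fst List.filter_sublist
    exact List.Nodup.sublist hs (hkeys_items ▸ hbd)
  have hkeys2 : bd.keys.filter keep = F.map Prod.fst := by
    rw [hkeys_items]
    exact (pv_map_fst_filter Prod.fst keep bd.items).symm
  have hk2nd : (bd.keys.filter keep).Nodup := List.Nodup.filter _ hbd
  have hret0 : F.foldl (fun (d : PySem.Dict String Int) (p : String × Int) =>
      d.insert p.1 p.2) PySem.Dict.empty = PySem.Dict.mk F := by
    apply PySem.Dict.ext
    rw [PySem.Dict.items_foldl_insert_fresh F Prod.fst Prod.snd PySem.Dict.empty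
      (fun a _ => PySem.Dict.contains_empty _) hFnd]
    simp
    rfl
  cases emp with
  | true =>
    rw [hemp rfl]
    simp only [Bool.not_true, if_false, if_true, Bool.false_eq_true]
    simp only [PySem.Dict.contains_empty, Bool.false_eq_true, if_false]
    rw [PySem.Dict.items_foldl_insert_fresh (bd.keys.filter keep) (fun a => a)
      (fun a => bd.getD a 0) PySem.Dict.empty (fun a _ => PySem.Dict.contains_empty _)
      (by simpa using hk2nd), hret0]
    rw [hkeys2, List.map_map]
    have hmapid : F.map ((fun a => (a, bd.getD a 0)) ∘ Prod.fst) = F.map id := by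
      apply List.map_congr_left
      intro p hp
      have hpb : p ∈ bd.items := List.mem_of_mem_filter hp
      have hv : bd.getD p.1 0 = p.2 := PySem.Dict.getD_of_mem_items bd hpb (hkeys_items ▸ hbd) 0
      simp [Function.comp, hv]
    simp [hmapid]
    rfl
  | false =>
    simp only [Bool.not_false, if_true, Bool.false_eq_true, if_false]
    rw [hret0]
    set add := ud.keys.filter (fun k => !(bd.keys.filter keep).contains k) with haddDef
    have haddnd : add.Nodup := List.Nodup.filter _ hud
    have hdisj : (bd.keys.filter keep).Disjoint add := by
      intro x hx hxa
      have h1 := List.of_mem_filter hxa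
      simp at h1
      rcases h1 with h | h
      · exact h (List.mem_of_mem_filter hx)
      · have h2 := List.of_mem_filter hx
        rw [h] at h2
        exact Bool.false_ne_true h2
    have hk3nd : (bd.keys.filter keep ++ add).Nodup := List.Nodup.append hk2nd haddnd hdisj
    rw [PySem.Dict.items_foldl_insert_fresh (bd.keys.filter keep ++ add) (fun a => a)
      (fun a => if ud.contains a then ud.getD a 0 else bd.getD a 0) PySem.Dict.empty
      (fun a _ => PySem.Dict.contains_empty _) (by simpa using hk3nd)]
    have hFk : (PySem.Dict.mk F).keys.Nodup := by rw [PySem.Dict.keys_mk]; exact hFnd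
    have hBnd : ((ud.items.foldl (fun (d : PySem.Dict String Int) (p : String × Int) =>
        d.insert p.1 p.2) (PySem.Dict.mk F))).keys.Nodup :=
      PySem.Dict.nodup_keys_foldl_insert_key ud.items Prod.fst (fun _ p => p.2) _ hFk
    rw [PySem.Dict.items_eq_map_keys _ hBnd 0]
    have hBkeys : ((ud.items.foldl (fun (d : PySem.Dict String Int) (p : String × Int) =>
        d.insert p.1 p.2) (PySem.Dict.mk F))).keys = bd.keys.filter keep ++ add := by
      rw [PySem.Dict.keys_foldl_insert_key ud.items Prod.fst (fun _ p => p.2) (PySem.Dict.mk F)]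
      rw [PySem.Dict.keys_mk]
      have h1 : F.map (fun x => x.1) = bd.keys.filter keep := hkeys2.symm
      have h2 : ud.items.map Prod.fst = ud.keys := rfl
      rw [h1, h2, PySem.Set.update_eq_append_filter, PySem.Set.ofList_eq_self_of_nodup _ hud]
      simp [PySem.Set.contains_eq_listContains, haddDef]
    rw [hBkeys]
    apply List.map_congr_left
    intro k hk
    have hud_eta : PySem.Dict.mk ud.items = ud := rfl
    have hstep := pv_getD_foldl_ins ud.items hud (PySem.Dict.mk F) k
    rw [hud_eta] at hstep
    rw [hstep]
    by_cases hc : ud.contains k = true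
    · simp [hc]
    · have hk2 : k ∈ bd.keys.filter keep := by
        rcases List.mem_append.mp hk with h | h
        · exact h
        · exfalso
          have hm : k ∈ ud.keys := List.mem_of_mem_filter h
          exact hc ((PySem.Dict.contains_iff_mem_keys ud k).mpr hm)
      obtain ⟨p, hpF, hpk⟩ := List.mem_map.mp (hkeys2 ▸ hk2)
      have hkp : (k, p.2) ∈ F := by rw [← hpk]; exact hpF
      have hpb : (k, p.2) ∈ bd.items := List.mem_of_mem_filter hkp
      have e1 : (PySem.Dict.mk F).getD k 0 = p.2 := PySem.Dict.getD_of_mem_items _ hkp hFk 0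
      have e2 : bd.getD k 0 = p.2 := PySem.Dict.getD_of_mem_items bd hpb (hkeys_items ▸ hbd) 0
      simp [hc, e1, e2]

-- bridge from A's shape (key union + comprehension) to B's shape (guarded build + update)
lemma pv_leaf (base upd : List (String × Int)) (c1 c2 : String → Bool) :
    ((if !upd.isEmpty then
        (PySem.Dict.ofList base).keys.filter (fun k => !(c1 k || c2 k)) ++
          (PySem.Dict.ofList upd).keys.filter (fun k =>
            !((PySem.Dict.ofList base).keys.filter (fun k => !(c1 k || c2 k))).contains k)
      else (PySem.Dict.ofList base).keys.filter (fun k => !(c1 k || c2 k))).foldl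
      (fun (d : PySem.Dict String Int) (k : String) =>
        d.insert k (if (PySem.Dict.ofList upd).contains k then (PySem.Dict.ofList upd).getD k 0
          else (PySem.Dict.ofList base).getD k 0)) PySem.Dict.empty).items
    = (if upd.isEmpty
       then ((PySem.Dict.ofList base).items.foldl
             (fun (d : PySem.Dict String Int) (p : String × Int) =>
               if c1 p.1 then d else if c2 p.1 then d else d.insert p.1 p.2)
             PySem.Dict.empty).items
       else ((PySem.Dict.ofList upd).items.foldl
             (fun (d : PySem.Dict String Int) (p : String × Int) => d.insert p.1 p.2)
             ((PySem.Dict.ofList base).items.foldl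
              (fun (d : PySem.Dict String Int) (p : String × Int) =>
                if c1 p.1 then d else if c2 p.1 then d else d.insert p.1 p.2)
              PySem.Dict.empty)).items) := by
  rw [pv_foldl_guard c1 c2]
  exact pv_central (PySem.Dict.ofList base) (PySem.Dict.ofList upd)
    (PySem.Dict.nodup_keys_ofList _) (PySem.Dict.nodup_keys_ofList _)
    upd.isEmpty (fun h => by rw [List.isEmpty_iff.mp h]; rfl) (fun k => !(c1 k || c2 k))

-- ===== VERDICT (by name: the statement is the Claim_ definition above) =====
theorem modify_dict_spec : Claim_equal_modify_dict := by
  intro base_dict copy exclude include_ update_dict _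
  unfold Spec_modify_dict modify_dict modify_dict_alt
  dsimp only
  rw [pv_keys2A include_ exclude (PySem.Dict.ofList base_dict).keys]
  cases update_dict with
  | none =>
    simp only [Option.getD_none, Option.elim_none]
    rw [pv_leaf base_dict [] (fun k => include_.elim false (fun inc => !inc.contains k))
      (fun k => exclude.elim false (fun exc => exc.contains k))]
    rfl
  | some l =>
    simp only [Option.getD_some, Option.elim_some]
    rw [apply_ite PySem.Dict.items]
    rw [pv_leaf base_dict l (fun k => include_.elim false (fun inc => !inc.contains k))
      (fun k => exclude.elim false (fun exc => exc.contains k))]
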